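-- pv_equiv track=rewrite | github.com/Zouski/adventsofcode | 2025/9/9_Movie_Theater.py | part2
-- ===== SOURCE A (Python) =====
-- from itertools import combinations
-- import bisect
--
-- def is_valid_rectangle(rect, hedges, vedges, hedge_py_values, vedge_px_values, longest_hedge, longest_vedge):
--     """Check if rectangle is valid (no edges cross through it).
--
--     Uses binary search to only check relevant edges based on their singular coordinate.
--     hedge_py_values and vedge_px_values are sorted lists for binary search.
--     Checks longest edges first for early exit.
--     """
--     x1, y1, x2, y2 = rect
--
--     # Check longest horizontal edge first
--     px1, px2, py = longest_hedge
--     if y1 < py < y2 and px1 < x2 <= px2: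
--         return False
--     if y1 < py < y2 and px1 <= x1 < px2:
--         return False
--
--     # Check longest vertical edge first
--     py1, py2, px = longest_vedge
--     if x1 < px < x2 and py1 < y2 <= py2:
--         return False
--     if x1 < px < x2 and py1 <= y1 < py2:
--         return False
--
--     # For horizontal edges, find those with py in range (y1, y2)
--     # Binary search for first edge with py > y1, check while py < y2
--     hedge_start = bisect.bisect_right(hedge_py_values, y1)
--     hedge_end = bisect.bisect_left(hedge_py_values, y2)
--
--     for i in range(hedge_start, hedge_end):
--         px1, px2, py = hedges[i]
--         if px1 < x2 <= px2 or px1 <= x1 < px2: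
--             return False
--
--     # For vertical edges, find those with px in range (x1, x2)
--     # Binary search for first edge with px > x1, check while px < x2
--     vedge_start = bisect.bisect_right(vedge_px_values, x1)
--     vedge_end = bisect.bisect_left(vedge_px_values, x2)
--
--     for i in range(vedge_start, vedge_end):
--         py1, py2, px = vedges[i]
--         if py1 < y2 <= py2 or py1 <= y1 < py2:
--             return False
--
--     return True
--
-- def part2(coords):
--     """Solve part 2 by checking for the largest rectangle inside the shape."""
--
--     # Build edges from consecutive coordinates, normalized by min/max
--     hedges = []
--     vedges = []
--     for i, (x1, y1) in enumerate(coords):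
--         x2, y2 = coords[(i + 1) % len(coords)]
--         if x1 == x2:
--             # Vertical edge: store as (min_y, max_y, x)
--             vedges.append((min(y1, y2), max(y1, y2), x1))
--         else:
--             # Horizontal edge: store as (min_x, max_x, y)
--             hedges.append((min(x1, x2), max(x1, x2), y1))
--
--     # Find longest edges to check first
--     longest_hedge_idx = max(range(len(hedges)), key=lambda i: hedges[i][1] - hedges[i][0])
--     longest_vedge_idx = max(range(len(vedges)), key=lambda i: vedges[i][1] - vedges[i][0])
--
--     longest_hedge = hedges[longest_hedge_idx]
--     longest_vedge = vedges[longest_vedge_idx]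
--
--     # Sort edges by their singular coordinate for binary search
--     # hedges sorted by y value (third element)
--     hedges_sorted = sorted(enumerate(hedges), key=lambda item: item[1][2])
--     hedges = [h for _, h in hedges_sorted]
--     hedge_py_values = [h[2] for h in hedges]
--
--     # vedges sorted by x value (third element)
--     vedges_sorted = sorted(enumerate(vedges), key=lambda item: item[1][2])
--     vedges = [v for _, v in vedges_sorted]
--     vedge_px_values = [v[2] for v in vedges]
--
--     largest = 0
--     best_coords = None
--     for a, b in combinations(coords, 2):
--         x1, y1 = a
--         x2, y2 = b
--
--         # Check area first (cheap) before expensive intersection checks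
--         area = (abs(x2 - x1) + 1) * (abs(y2 - y1) + 1)
--         if area <= largest:
--             continue
--
--         # Build normalized rectangle
--         rect = (min(x1, x2), min(y1, y2), max(x1, x2), max(y1, y2))
--
--         if is_valid_rectangle(rect, hedges, vedges, hedge_py_values, vedge_px_values, longest_hedge, longest_vedge):
--             largest = area
--             best_coords = (a, b)
--
--     return largest, best_coords
-- ===== SOURCE B (Python) =====
-- from itertools import combinations
--
-- def part2(coords):
--     """Solve part 2 by checking for the largest rectangle inside the shape.
--
--     Simpler rewrite: the sorted-edge + bisect + longest-edge-first validity
--     machinery is replaced by one plain linear scan over all edges."""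
--     hedges = []
--     vedges = []
--     n = len(coords)
--     for i, (x1, y1) in enumerate(coords):
--         x2, y2 = coords[(i + 1) % n]
--         if x1 == x2:
--             vedges.append((min(y1, y2), max(y1, y2), x1))
--         else:
--             hedges.append((min(x1, x2), max(x1, x2), y1))
--
--     if not hedges or not vedges:
--         raise ValueError("polygon needs edges in both directions")
--
--     def blocked(x1, y1, x2, y2):
--         for px1, px2, py in hedges:
--             if y1 < py < y2 and (px1 < x2 <= px2 or px1 <= x1 < px2):
--                 return True
--         for py1, py2, px in vedges:
--             if x1 < px < x2 and (py1 < y2 <= py2 or py1 <= y1 < py2):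
--                 return True
--         return False
--
--     largest = 0
--     best = None
--     for a, b in combinations(coords, 2):
--         x1, y1 = a
--         x2, y2 = b
--         area = (abs(x2 - x1) + 1) * (abs(y2 - y1) + 1)
--         if area <= largest:
--             continue
--         if not blocked(min(x1, x2), min(y1, y2), max(x1, x2), max(y1, y2)):
--             largest = area
--             best = (a, b)
--     return largest, best
-- ===== Notes on version B (the rewrite author's own statement) =====
-- stated objective: simpler
-- what changed: The validity check's sorted edge lists, bisect index windows and longest-edge-first early exits are all removed; B checks a candidate rectangle with one plain linear scan over every horizontal and vertical edge using the same boundary comparisons, keeping the identical edge-building step, combinations loop, area pruning and strict-greater update. B validates explicitly (ValueError when an edge direction is missing) where A's max() over an empty range raised the same error.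
import Mathlib
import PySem

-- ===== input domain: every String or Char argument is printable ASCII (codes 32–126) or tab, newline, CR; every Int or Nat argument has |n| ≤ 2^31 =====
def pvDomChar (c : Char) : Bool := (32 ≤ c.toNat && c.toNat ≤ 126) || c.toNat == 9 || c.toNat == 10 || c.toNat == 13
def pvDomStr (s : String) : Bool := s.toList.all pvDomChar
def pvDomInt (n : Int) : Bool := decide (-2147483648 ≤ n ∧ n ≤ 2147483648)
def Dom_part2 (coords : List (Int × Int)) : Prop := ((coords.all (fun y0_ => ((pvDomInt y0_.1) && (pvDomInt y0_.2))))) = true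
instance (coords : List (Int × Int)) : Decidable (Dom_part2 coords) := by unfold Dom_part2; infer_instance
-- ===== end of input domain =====

-- B replaces A's sorted-edge + bisect windows + longest-edge-first validity check by one plain
-- linear scan over every edge (objective: simpler); edge building, combinations loop, area pruning
-- and the strict-greater update are kept identical.

-- ===== PORT A =====

-- Edge building: hedges/vedges from consecutive coordinate pairs, wrapping with (i+1) % len(coords).
def pvBuildEdgesA (coords : List (Int × Int)) : List (Int × Int × Int) × List (Int × Int × Int) :=
  (PySem.List.enumerate coords).foldl (fun hv p =>
    -- coords[(i+1) % len(coords)]: the index is always in range while the loop runs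
    let q := PySem.List.pyGetD coords (PySem.Int.mod (p.1 + 1) (coords.length : Int)) (0, 0)
    if p.2.1 = q.1 then
      (hv.1, hv.2 ++ [(min p.2.2 q.2, max p.2.2 q.2, p.2.1)])
    else
      (hv.1 ++ [(min p.2.1 q.1, max p.2.1 q.1, p.2.2)], hv.2)) ([], [])

-- max(range(len(l)), key=lambda i: l[i][1] - l[i][0]) then l[idx]; Python's max raises
-- ValueError on an empty list — excluded by Pre_part2 — so the '.getD 0' default is never
-- reached on admitted inputs.
def pvLongest (l : List (Int × Int × Int)) : Int × Int × Int :=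
  PySem.List.pyGetD l
    ((PySem.List.max? (PySem.List.pyRange 0 (l.length : Int) 1)
        (fun i => (PySem.List.pyGetD l i (0, 0, 0)).2.1 - (PySem.List.pyGetD l i (0, 0, 0)).1)).getD 0)
    (0, 0, 0)

-- sorted(enumerate(l), key=lambda item: item[1][2]) then strip the indices.
def pvSortEdges (l : List (Int × Int × Int)) : List (Int × Int × Int) :=
  (PySem.List.sorted (PySem.List.enumerate l) (fun it => it.2.2.2)).map (fun it => it.2)

-- is_valid_rectangle: longest-edge early exits, then the bisect-narrowed index scans
-- (the Python for-loops only 'return False' early, so each is an 'any' over its range).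
def pvIsValidA (rect : Int × Int × Int × Int) (hedges vedges : List (Int × Int × Int))
    (hpys vpys : List Int) (lh lv : Int × Int × Int) : Bool :=
  let x1 := rect.1; let y1 := rect.2.1; let x2 := rect.2.2.1; let y2 := rect.2.2.2
  if y1 < lh.2.2 ∧ lh.2.2 < y2 ∧ lh.1 < x2 ∧ x2 ≤ lh.2.1 then false
  else if y1 < lh.2.2 ∧ lh.2.2 < y2 ∧ lh.1 ≤ x1 ∧ x1 < lh.2.1 then false
  else if x1 < lv.2.2 ∧ lv.2.2 < x2 ∧ lv.1 < y2 ∧ y2 ≤ lv.2.1 then false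
  else if x1 < lv.2.2 ∧ lv.2.2 < x2 ∧ lv.1 ≤ y1 ∧ y1 < lv.2.1 then false
  else if (PySem.List.pyRange ((PySem.List.bisectRight hpys y1 : Nat) : Int)
             ((PySem.List.bisectLeft hpys y2 : Nat) : Int) 1).any (fun i =>
      let h := PySem.List.pyGetD hedges i (0, 0, 0)
      decide ((h.1 < x2 ∧ x2 ≤ h.2.1) ∨ (h.1 ≤ x1 ∧ x1 < h.2.1))) then false
  else if (PySem.List.pyRange ((PySem.List.bisectRight vpys x1 : Nat) : Int)
             ((PySem.List.bisectLeft vpys x2 : Nat) : Int) 1).any (fun i =>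
      let v := PySem.List.pyGetD vedges i (0, 0, 0)
      decide ((v.1 < y2 ∧ y2 ≤ v.2.1) ∨ (v.1 ≤ y1 ∧ y1 < v.2.1))) then false
  else true

def part2 (coords : List (Int × Int)) : Int × (Option ((Int × Int) × (Int × Int))) :=
  let hv := pvBuildEdgesA coords
  let lh := pvLongest hv.1
  let lv := pvLongest hv.2
  let hedges := pvSortEdges hv.1
  let hpys := hedges.map (fun h => h.2.2)
  let vedges := pvSortEdges hv.2
  let vpys := vedges.map (fun v => v.2.2)
  (PySem.List.combinations coords 2).foldl (fun st ab =>
    match ab with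
    | [a, b] =>
      let area : Int := (((b.1 - a.1).natAbs : Int) + 1) * (((b.2 - a.2).natAbs : Int) + 1)
      if area ≤ st.1 then st
      else if pvIsValidA (min a.1 b.1, min a.2 b.2, max a.1 b.1, max a.2 b.2)
                hedges vedges hpys vpys lh lv
           then (area, some (a, b)) else st
    | _ => st) ((0 : Int), (none : Option ((Int × Int) × (Int × Int))))

-- ===== PORT B =====

-- B's edge-building loop (verbatim the same step in Source B).
def pvBuildEdgesB (coords : List (Int × Int)) : List (Int × Int × Int) × List (Int × Int × Int) :=
  (PySem.List.enumerate coords).foldl (fun hv p =>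
    -- coords[(i+1) % n]: the index is always in range while the loop runs
    let q := PySem.List.pyGetD coords (PySem.Int.mod (p.1 + 1) (coords.length : Int)) (0, 0)
    if p.2.1 = q.1 then
      (hv.1, hv.2 ++ [(min p.2.2 q.2, max p.2.2 q.2, p.2.1)])
    else
      (hv.1 ++ [(min p.2.1 q.1, max p.2.1 q.1, p.2.2)], hv.2)) ([], [])

-- blocked: one plain linear scan over every hedge and every vedge.
def pvBlockedB (x1 y1 x2 y2 : Int) (hedges vedges : List (Int × Int × Int)) : Bool :=
  hedges.any (fun h =>
      decide (y1 < h.2.2 ∧ h.2.2 < y2) &&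
      (decide (h.1 < x2 ∧ x2 ≤ h.2.1) || decide (h.1 ≤ x1 ∧ x1 < h.2.1))) ||
  vedges.any (fun v =>
      decide (x1 < v.2.2 ∧ v.2.2 < x2) &&
      (decide (v.1 < y2 ∧ y2 ≤ v.2.1) || decide (v.1 ≤ y1 ∧ y1 < v.2.1)))

def part2_alt (coords : List (Int × Int)) : Int × (Option ((Int × Int) × (Int × Int))) :=
  let hv := pvBuildEdgesB coords
  -- 'raise ValueError' when an edge direction is missing: excluded by Pre_part2; the
  -- (0, none) default is never reached on admitted inputs
  if hv.1 = [] ∨ hv.2 = [] then (0, none) else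
  (PySem.List.combinations coords 2).foldl (fun st ab =>
    -- 'for a, b in combinations(coords, 2)': each element is exactly a pair
    let a := ab.getD 0 (0, 0)
    let b := ab.getD 1 (0, 0)
    let area : Int := (((b.1 - a.1).natAbs : Int) + 1) * (((b.2 - a.2).natAbs : Int) + 1)
    if area ≤ st.1 then st
    else if pvBlockedB (min a.1 b.1) (min a.2 b.2) (max a.1 b.1) (max a.2 b.2) hv.1 hv.2
         then st else (area, some (a, b))) ((0 : Int), (none : Option ((Int × Int) × (Int × Int))))

-- ===== PRECONDITION & SPEC =====

-- Pre_part2 excludes exactly the inputs on which A raises ValueError (its max() over an empty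
-- range when there is no horizontal or no vertical edge, e.g. the empty list); on the admitted
-- inputs the list of consecutive coordinate pairs (wrapping around) yields at least one edge of
-- each direction.  B raises ValueError on those inputs too (its explicit validation guard).
def Pre_part2 (coords : List (Int × Int)) : Prop :=
  (∃ i < coords.length,
      (coords.getD i (0, 0)).1 ≠ (coords.getD ((i + 1) % coords.length) (0, 0)).1) ∧
  (∃ i < coords.length,
      (coords.getD i (0, 0)).1 = (coords.getD ((i + 1) % coords.length) (0, 0)).1)
instance (coords : List (Int × Int)) : Decidable (Pre_part2 coords) := by
  unfold Pre_part2; infer_instance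

def pvWitness_part2 : (List (Int × Int)) := [(0, 0), (2, 0), (2, 2), (0, 2)]

def Spec_part2 (coords : List (Int × Int)) (out : Int × (Option ((Int × Int) × (Int × Int)))) : Prop := out = part2_alt coords
instance (coords : List (Int × Int)) (out : Int × (Option ((Int × Int) × (Int × Int)))) : Decidable (Spec_part2 coords out) := by unfold Spec_part2; infer_instance

-- ===== CLAIM (what is proved, stated in full; the proofs are below) =====
def Claim_equal_part2 : Prop := ∀ (coords : List (Int × Int)), Dom_part2 coords → Pre_part2 coords → Spec_part2 coords (part2 coords)

-- ===== LEMMAS AND PROOFS =====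

theorem pvBuild_fold (coords : List (Int × Int)) (l : List (Int × (Int × Int)))
    (h v : List (Int × Int × Int)) :
    l.foldl (fun hv p =>
      let q := PySem.List.pyGetD coords (PySem.Int.mod (p.1 + 1) (coords.length : Int)) (0, 0)
      if p.2.1 = q.1 then
        (hv.1, hv.2 ++ [(min p.2.2 q.2, max p.2.2 q.2, p.2.1)])
      else
        (hv.1 ++ [(min p.2.1 q.1, max p.2.1 q.1, p.2.2)], hv.2)) (h, v)
    = (h ++ l.filterMap (fun p =>
          let q := PySem.List.pyGetD coords (PySem.Int.mod (p.1 + 1) (coords.length : Int)) (0, 0)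
          if p.2.1 = q.1 then none else some (min p.2.1 q.1, max p.2.1 q.1, p.2.2)),
       v ++ l.filterMap (fun p =>
          let q := PySem.List.pyGetD coords (PySem.Int.mod (p.1 + 1) (coords.length : Int)) (0, 0)
          if p.2.1 = q.1 then some (min p.2.2 q.2, max p.2.2 q.2, p.2.1) else none)) := by
  induction l generalizing h v with
  | nil => simp
  | cons p t ih =>
    simp only [List.foldl_cons, List.filterMap_cons]
    by_cases hc : p.2.1 = (PySem.List.pyGetD coords (PySem.Int.mod (p.1 + 1) (coords.length : Int)) (0, 0)).1
    · simp only [hc, ih]; simp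
    · simp only [if_neg hc, ih]; simp

theorem pvNbr (coords : List (Int × Int)) (i : Nat) :
    PySem.List.pyGetD coords (PySem.Int.mod ((i : Int) + 1) (coords.length : Int)) (0, 0)
      = coords.getD ((i + 1) % coords.length) (0, 0) := by
  have : ((i : Int) + 1) = (((i + 1 : Nat)) : Int) := by push_cast; ring
  rw [this, PySem.Int.mod_natCast, PySem.List.pyGetD_natCast]

-- the two ports transliterate the same Python edge-building loop
theorem pvBuild_eq : pvBuildEdgesB = pvBuildEdgesA := rfl

theorem pvBuild_ne (coords : List (Int × Int)) (hpre : Pre_part2 coords) :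
    (pvBuildEdgesA coords).1 ≠ [] ∧ (pvBuildEdgesA coords).2 ≠ [] := by
  obtain ⟨⟨i, hi, hne⟩, ⟨j, hj, heq⟩⟩ := hpre
  unfold pvBuildEdgesA
  rw [pvBuild_fold]
  constructor
  · simp only [List.nil_append, ne_eq, List.filterMap_eq_nil_iff]
    intro hall
    have hmem : ((0 : Int) + (i : Int), coords[i]) ∈ PySem.List.enumerate coords :=
      (PySem.List.mem_enumerate_iff coords 0 _).mpr ⟨i, hi, rfl⟩
    have := hall _ hmem
    simp only [zero_add, pvNbr] at this
    rw [List.getD_eq_getElem _ _ hi] at hne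
    split at this
    · exact hne (by assumption)
    · exact Option.some_ne_none _ this
  · simp only [List.nil_append, ne_eq, List.filterMap_eq_nil_iff]
    intro hall
    have hmem : ((0 : Int) + (j : Int), coords[j]) ∈ PySem.List.enumerate coords :=
      (PySem.List.mem_enumerate_iff coords 0 _).mpr ⟨j, hj, rfl⟩
    have := hall _ hmem
    simp only [zero_add, pvNbr] at this
    rw [List.getD_eq_getElem _ _ hj] at heq
    split at this
    · exact Option.some_ne_none _ this
    · exact (by assumption : ¬ _) heq


-- the longest edge is an element of its list
theorem pvLongest_mem (l : List (Int × Int × Int)) (hne : l ≠ []) : pvLongest l ∈ l := by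
  unfold pvLongest
  have hlen : 0 < l.length := List.length_pos_iff.mpr hne
  rcases hm : PySem.List.max? (PySem.List.pyRange 0 (l.length : Int) 1)
      (fun i => (PySem.List.pyGetD l i (0, 0, 0)).2.1 - (PySem.List.pyGetD l i (0, 0, 0)).1) with _ | m
  · exfalso
    rw [PySem.List.max?_eq_none_iff] at hm
    have : (0 : Int) ∈ PySem.List.pyRange 0 (l.length : Int) 1 :=
      PySem.List.mem_pyRange_one.mpr (by omega)
    simp [hm] at this
  · have hmem := PySem.List.max?_mem hm
    rw [PySem.List.mem_pyRange_one] at hmem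
    simp only [Option.getD_some]
    exact PySem.List.pyGetD_mem l (0, 0, 0) (by constructor <;> omega)

-- keys of the sorted edge list are nondecreasing
theorem pvSort_pairwise (l : List (Int × Int × Int)) :
    ((pvSortEdges l).map (fun h => h.2.2)).Pairwise (· ≤ ·) := by
  unfold pvSortEdges
  rw [List.map_map]
  exact PySem.List.sorted_map_key_pairwise (PySem.List.enumerate l) (fun it => it.2.2.2)

theorem pvSort_perm (l : List (Int × Int × Int)) : (pvSortEdges l).Perm l := by
  unfold pvSortEdges
  have := (PySem.List.sorted_perm (PySem.List.enumerate l) (fun it => it.2.2.2) false).map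
    (fun it => it.2)
  simpa [PySem.List.map_snd_enumerate] using this

-- A's per-direction check (longest edge first, then the bisect-narrowed index scan over the
-- sorted list) decides exactly "some edge with key strictly between a and b satisfies pB".
theorem pvDir_any (l : List (Int × Int × Int)) (hne : l ≠ []) (a b : Int)
    (pB : Int × Int × Int → Bool) :
    ((decide (a < (pvLongest l).2.2 ∧ (pvLongest l).2.2 < b) && pB (pvLongest l)) ||
     (PySem.List.pyRange ((PySem.List.bisectRight ((pvSortEdges l).map (fun h => h.2.2)) a : Nat) : Int)
        ((PySem.List.bisectLeft ((pvSortEdges l).map (fun h => h.2.2)) b : Nat) : Int) 1).any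
       (fun i => pB (PySem.List.pyGetD (pvSortEdges l) i (0, 0, 0))))
    = l.any (fun h => decide (a < h.2.2 ∧ h.2.2 < b) && pB h) := by
  set sl := pvSortEdges l with hsl
  set pys := sl.map (fun h => h.2.2) with hpys
  have hp : pys.Pairwise (· ≤ ·) := pvSort_pairwise l
  have hlen : pys.length = sl.length := List.length_map ..
  obtain ⟨hRle, hRlt, hRge⟩ := PySem.List.bisectRight_spec pys a hp
  obtain ⟨hLle, hLlt, hLge⟩ := PySem.List.bisectLeft_spec pys b hp
  rw [Bool.eq_iff_iff]
  simp only [Bool.or_eq_true, Bool.and_eq_true, decide_eq_true_eq, List.any_eq_true]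
  constructor
  · rintro (⟨⟨h1, h2⟩, h3⟩ | ⟨i, hi, hpB⟩)
    · exact ⟨pvLongest l, pvLongest_mem l hne, ⟨h1, h2⟩, h3⟩
    · rw [PySem.List.mem_pyRange_one] at hi
      have hiR : PySem.List.bisectRight pys a ≤ i.toNat := by omega
      have hiL : i.toNat < PySem.List.bisectLeft pys b := by omega
      have hilen : i.toNat < sl.length := by omega
      rw [PySem.List.pyGetD_eq_getElem sl (0, 0, 0) (by omega) (by omega)] at hpB
      refine ⟨sl[i.toNat], (pvSort_perm l).mem_iff.mp (List.getElem_mem _), ⟨?_, ?_⟩, hpB⟩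
      · have := hRge i.toNat (by omega) hiR
        simpa [hpys, List.getElem_map] using this
      · have := hLlt i.toNat (by omega) hiL
        simpa [hpys, List.getElem_map] using this
  · rintro ⟨h, hmem, ⟨h1, h2⟩, h3⟩
    right
    obtain ⟨j, hj0, hje⟩ := List.mem_iff_getElem.mp ((pvSort_perm l).mem_iff.mpr hmem)
    have hj : j < sl.length := by rw [hsl]; exact hj0
    have hje' : sl[j]'hj = h := hje
    have hpj : pys[j]'(by omega) = h.2.2 := by
      simp [hpys, List.getElem_map, hje']
    have hbR : PySem.List.bisectRight pys a ≤ j := by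
      by_contra hc
      have := hRlt j (by omega) (by omega)
      omega
    have hbL : j < PySem.List.bisectLeft pys b := by
      by_contra hc
      have := hLge j (by omega) (by omega)
      omega
    refine ⟨(j : Int), PySem.List.mem_pyRange_one.mpr ⟨by exact_mod_cast hbR, by exact_mod_cast hbL⟩, ?_⟩
    rw [PySem.List.pyGetD_eq_getElem sl (0, 0, 0) (by omega) (by exact_mod_cast hj)]
    simpa [hje'] using h3

-- the validity checks agree: A's is_valid_rectangle = not B's blocked
theorem pvChain (c1 c2 c3 c4 : Prop) [Decidable c1] [Decidable c2] [Decidable c3] [Decidable c4]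
    (rH rV : Bool) :
    (if c1 then false else if c2 then false else if c3 then false else if c4 then false
     else if rH then false else if rV then false else true)
    = !(((decide c1 || decide c2) || rH) || ((decide c3 || decide c4) || rV)) := by
  by_cases c1 <;> by_cases c2 <;> by_cases c3 <;> by_cases c4 <;> cases rH <;> cases rV <;>
    simp [*]

theorem pvSplit (A B P Q : Prop) [Decidable A] [Decidable B] [Decidable P] [Decidable Q] :
    (decide (A ∧ B ∧ P) || decide (A ∧ B ∧ Q)) = (decide (A ∧ B) && (decide P || decide Q)) := by
  by_cases A <;> by_cases B <;> by_cases P <;> by_cases Q <;> simp [*]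

theorem pvValid_eq (h0 v0 : List (Int × Int × Int)) (hh : h0 ≠ []) (hv : v0 ≠ [])
    (x1 y1 x2 y2 : Int) :
    pvIsValidA (x1, y1, x2, y2) (pvSortEdges h0) (pvSortEdges v0)
        ((pvSortEdges h0).map (fun h => h.2.2)) ((pvSortEdges v0).map (fun v => v.2.2))
        (pvLongest h0) (pvLongest v0)
    = ! pvBlockedB x1 y1 x2 y2 h0 v0 := by
  have hH := pvDir_any h0 hh y1 y2
    (fun h => decide ((h.1 < x2 ∧ x2 ≤ h.2.1) ∨ (h.1 ≤ x1 ∧ x1 < h.2.1)))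
  have hV := pvDir_any v0 hv x1 x2
    (fun v => decide ((v.1 < y2 ∧ y2 ≤ v.2.1) ∨ (v.1 ≤ y1 ∧ y1 < v.2.1)))
  simp only [pvIsValidA]
  rw [pvChain]
  unfold pvBlockedB
  refine congrArg (! ·) ?_
  beta_reduce at hH hV
  simp only [Bool.decide_or] at hH hV ⊢
  rw [pvSplit, pvSplit, hH, hV]

-- ===== VERDICT (by name: the statement is the Claim_ definition above) =====
theorem part2_spec : Claim_equal_part2 := by
  intro coords _ hpre
  obtain ⟨hh, hv⟩ := pvBuild_ne coords hpre
  show part2 coords = part2_alt coords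
  unfold part2 part2_alt
  rw [pvBuild_eq, if_neg (by push Not; exact ⟨hh, hv⟩)]
  refine List.foldl_ext _ _ _ (fun st ab hmem => ?_)
  have hlen : ab.length = 2 := PySem.List.length_of_mem_combinations hmem
  match ab, hlen with
  | [a, b], _ =>
    simp only [List.getD_cons_zero, List.getD_cons_succ]
    split
    · rfl
    · rw [pvValid_eq _ _ hh hv]
      cases pvBlockedB (min a.1 b.1) (min a.2 b.2) (max a.1 b.1) (max a.2 b.2)
          (pvBuildEdgesA coords).1 (pvBuildEdgesA coords).2 <;> simp
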